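-- pv_equiv track=rewrite | github.com/ConstantineNAN/Bakaishineki | utilities.py | binary_to_symbol
-- ===== SOURCE A (Python) =====
-- def binary_to_symbol(binary_string):
--     symbol_representation = ''
--     token_count = 0
--
--     for char in binary_string:
--         if char == '1':
--             symbol_representation += '---\n'
--         elif char == '0':
--             symbol_representation += '- -\n'
--         token_count += 1
--
--         if token_count % 6 == 0 and token_count < len(binary_string):
--             symbol_representation += '\n'
--
--     return symbol_representation
-- ===== SOURCE B (Python) =====
-- def binary_to_symbol(binary_string):
--     block = {'1': '---\n', '0': '- -\n'}
--     groups = [''.join(block.get(c, '') for c in binary_string[i:i + 6])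
--               for i in range(0, len(binary_string), 6)]
--     return '\n'.join(groups)
-- ===== Notes on version B (the rewrite author's own statement) =====
-- stated objective: simpler
-- what changed: A's single loop with a running token counter and conditional separator insertion is replaced by a per-character block map, stride-6 slicing of the input into groups, and a newline-separated join of the group strings.
import Mathlib
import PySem

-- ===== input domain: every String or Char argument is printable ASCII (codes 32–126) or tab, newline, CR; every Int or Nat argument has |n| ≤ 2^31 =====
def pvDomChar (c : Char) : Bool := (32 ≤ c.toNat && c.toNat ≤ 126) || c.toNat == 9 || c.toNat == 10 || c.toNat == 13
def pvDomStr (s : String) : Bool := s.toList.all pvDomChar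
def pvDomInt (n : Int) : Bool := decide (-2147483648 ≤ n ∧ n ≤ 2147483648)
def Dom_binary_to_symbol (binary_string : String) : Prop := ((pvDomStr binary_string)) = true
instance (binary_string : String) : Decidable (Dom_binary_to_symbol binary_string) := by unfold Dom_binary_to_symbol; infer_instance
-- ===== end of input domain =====

-- B replaces A's single counter-driven accumulation loop by a per-character block map,
-- stride-6 grouping and a newline-separated join (objective: simpler decomposition, same cost).
-- Strings are accumulated as their character lists (PySem convention) and converted at the end.

-- ===== PORT A =====
-- literal port of A: one fold over the characters carrying (accumulated chars, token_count)
def binary_to_symbol (binary_string : String) : String :=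
  let res := binary_string.toList.foldl
    (fun (st : List Char × Int) c =>
      let rep := if c = '1' then st.1 ++ "---\n".toList
                 else if c = '0' then st.1 ++ "- -\n".toList
                 else st.1
      let tc := st.2 + 1
      let rep := if PySem.Int.mod tc 6 = 0 ∧ tc < PySem.Str.len binary_string
                 then rep ++ ['\n'] else rep
      (rep, tc))
    ([], 0)
  String.ofList res.1

-- ===== PORT B =====
-- the dict {'1': '---\n', '0': '- -\n'} of Source B
def pvBlockDict : PySem.Dict Char String :=
  PySem.Dict.insert (PySem.Dict.insert PySem.Dict.empty '1' "---\n") '0' "- -\n"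

-- literal port of B: map chars to blocks, group by stride-6 slices, join with '\n'
def binary_to_symbol_alt (binary_string : String) : String :=
  let groups := (PySem.List.pyRange 0 (PySem.Str.len binary_string) 6).map
    (fun i => PySem.Str.join ""
      ((PySem.Str.slice binary_string (some i) (some (i + 6))).toList.map
        (fun c => PySem.Dict.getD pvBlockDict c "")))
  PySem.Str.join "\n" groups

-- ===== PRECONDITION & SPEC =====
def Spec_binary_to_symbol (binary_string : String) (out : String) : Prop := out = binary_to_symbol_alt binary_string
instance (binary_string : String) (out : String) : Decidable (Spec_binary_to_symbol binary_string out) := by unfold Spec_binary_to_symbol; infer_instance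

-- ===== CLAIM (what is proved, stated in full; the proofs are below) =====
def Claim_equal_binary_to_symbol : Prop := ∀ (binary_string : String), Dom_binary_to_symbol binary_string → Spec_binary_to_symbol binary_string (binary_to_symbol binary_string)

-- ===== LEMMAS AND PROOFS =====

-- the block emitted for one character
def pvBlk (c : Char) : List Char :=
  if c = '1' then "---\n".toList else if c = '0' then "- -\n".toList else []

def pvBlocks (cs : List Char) : List Char := (cs.map pvBlk).flatten

-- A's step function, with the total length n fixed
def pvStepA (n : Int) (st : List Char × Int) (c : Char) : List Char × Int :=
  let rep := if c = '1' then st.1 ++ "---\n".toList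
             else if c = '0' then st.1 ++ "- -\n".toList
             else st.1
  let tc := st.2 + 1
  let rep := if PySem.Int.mod tc 6 = 0 ∧ tc < n then rep ++ ['\n'] else rep
  (rep, tc)

-- what A appends while folding cs with counter starting at t (total length n)
def pvH (n : Int) (t : Int) : List Char → List Char
  | [] => []
  | c :: cs =>
      pvBlk c ++ (if PySem.Int.mod (t + 1) 6 = 0 ∧ t + 1 < n then ['\n'] else [])
        ++ pvH n (t + 1) cs

-- B's result, as a pure function of the character list (stride-6 chunks joined by '\n')
def pvG (cs : List Char) : List Char :=
  if _ : cs.length ≤ 6 then pvBlocks cs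
  else pvBlocks (cs.take 6) ++ '\n' :: pvG (cs.drop 6)
termination_by cs.length
decreasing_by simp; omega

theorem pvFoldA (n : Int) (cs : List Char) : ∀ acc t,
    cs.foldl (pvStepA n) (acc, t) = (acc ++ pvH n t cs, t + cs.length) := by
  induction cs with
  | nil => intro acc t; simp [pvH]
  | cons c cs ih =>
    intro acc t
    have hs : pvStepA n (acc, t) c
        = (acc ++ (pvBlk c ++ (if PySem.Int.mod (t + 1) 6 = 0 ∧ t + 1 < n then ['\n'] else [])), t + 1) := by
      simp only [pvStepA, pvBlk]
      split_ifs <;> simp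
    rw [List.foldl_cons, hs, ih]
    rw [Prod.mk.injEq]
    constructor
    · simp [pvH]
    · push_cast [List.length_cons]; ring

theorem pvMod6 (t : Int) : PySem.Int.mod t 6 = t % 6 := by
  show t.fmod 6 = t % 6
  rw [Int.fmod_eq_emod]; norm_num

-- no separator fires anywhere in cs
theorem pvH_noSep (n : Int) (cs : List Char) : ∀ t,
    (∀ i : Int, 1 ≤ i → i ≤ cs.length → ¬((t + i) % 6 = 0 ∧ t + i < n)) →
    pvH n t cs = pvBlocks cs := by
  induction cs with
  | nil => intro t _; simp [pvH, pvBlocks]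
  | cons c cs ih =>
    intro t h
    have h1 : ¬(PySem.Int.mod (t + 1) 6 = 0 ∧ t + 1 < n) := by
      rw [pvMod6]; exact h 1 le_rfl (by push_cast [List.length_cons]; omega)
    rw [pvH, if_neg h1, ih (t + 1) (fun i hi1 hi2 => by
      intro hc
      obtain ⟨hc1, hc2⟩ := hc
      exact h (i + 1) (by omega) (by push_cast [List.length_cons]; omega) ⟨by omega, by omega⟩)]
    simp [pvBlocks]

-- the separator fires exactly after the last character of cs
theorem pvH_sepLast (n : Int) (cs : List Char) : ∀ t, cs ≠ [] →
    (∀ i : Int, 1 ≤ i → i ≤ cs.length → ((t + i) % 6 = 0 ∧ t + i < n ↔ i = cs.length)) →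
    pvH n t cs = pvBlocks cs ++ ['\n'] := by
  induction cs with
  | nil => intro t h; exact absurd rfl h
  | cons c cs ih =>
    intro t _ h
    rcases cs with _ | ⟨d, ds⟩
    · have h1 : PySem.Int.mod (t + 1) 6 = 0 ∧ t + 1 < n := by
        rw [pvMod6]
        exact (h 1 le_rfl (by simp)).mpr (by simp)
      rw [pvH, if_pos h1]
      simp [pvH, pvBlocks]
    · have hlen1 : (1 : Int) ≠ ((c :: d :: ds).length : Int) := by push_cast [List.length_cons]; omega
      have h1 : ¬(PySem.Int.mod (t + 1) 6 = 0 ∧ t + 1 < n) := by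
        rw [pvMod6]
        intro hc
        exact hlen1 ((h 1 le_rfl (by push_cast [List.length_cons]; omega)).mp hc)
      rw [pvH, if_neg h1, ih (t + 1) (by simp) (fun i hi1 hi2 => by
        push_cast [List.length_cons] at hi2
        have H := h (i + 1) (by omega) (by push_cast [List.length_cons]; omega)
        push_cast [List.length_cons] at H ⊢
        constructor
        · intro hm
          obtain ⟨hm1, hm2⟩ := hm
          have := H.mp ⟨by omega, by omega⟩
          omega
        · intro he
          have := H.mpr (by omega)
          exact ⟨by omega, by omega⟩)]
      simp [pvBlocks]

theorem pvH_append (n t : Int) (xs ys : List Char) :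
    pvH n t (xs ++ ys) = pvH n t xs ++ pvH n (t + xs.length) ys := by
  induction xs generalizing t with
  | nil => simp [pvH]
  | cons c cs ih =>
    simp only [List.cons_append, pvH, ih (t + 1), List.length_cons]
    rw [show t + 1 + (cs.length : Int) = t + ((cs.length : Int) + 1) from by ring]
    simp

-- main A-side characterisation: starting at a chunk boundary, A's remaining output is pvG
theorem pvH_eq_G (cs : List Char) : ∀ t, 0 ≤ t → t % 6 = 0 →
    pvH (t + cs.length) t cs = pvG cs := by
  induction hn : cs.length using Nat.strong_induction_on generalizing cs with
  | _ n ih =>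
  subst hn
  intro t ht0 ht6
  by_cases h6 : cs.length ≤ 6
  · rw [pvG, dif_pos h6]
    apply pvH_noSep
    intro i hi1 hi2 hc
    obtain ⟨hm, hl⟩ := hc
    omega
  · rw [pvG, dif_neg h6]
    have hlen : (cs.take 6).length = 6 := by simp; omega
    calc pvH (t + cs.length) t cs
        = pvH (t + cs.length) t (cs.take 6) ++ pvH (t + cs.length) (t + 6) (cs.drop 6) := by
          conv_lhs => rw [show cs = cs.take 6 ++ cs.drop 6 from (List.take_append_drop 6 cs).symm]
          rw [pvH_append, hlen]
          norm_num
      _ = (pvBlocks (cs.take 6) ++ ['\n']) ++ pvG (cs.drop 6) := by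
          congr 1
          · apply pvH_sepLast _ _ _ (by intro h; rw [h] at hlen; simp at hlen)
            intro i hi1 hi2
            rw [hlen] at hi2 ⊢
            push_cast at hi2 ⊢
            have hbig : (6 : Int) < cs.length := by exact_mod_cast (by omega : (6:ℕ) < cs.length)
            constructor
            · intro hc; obtain ⟨hm, hl⟩ := hc; omega
            · intro he; subst he; exact ⟨by omega, by omega⟩
          · have he : t + (cs.length : Int) = (t + 6) + ((cs.drop 6).length : Int) := by
              simp; omega
            rw [he]
            exact ih (cs.drop 6).length (by simp; omega) _ rfl (t + 6) (by omega) (by omega)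
      _ = pvBlocks (cs.take 6) ++ '\n' :: pvG (cs.drop 6) := by simp

-- B-side: the stride-6 pyRange, specialised to step 6
theorem pyRange6_cons (a b : Int) (h : a < b) :
    PySem.List.pyRange a b 6 = a :: PySem.List.pyRange (a + 6) b 6 := by
  rw [PySem.List.pyRange_of_pos a b (by norm_num), PySem.List.pyRange_of_pos (a+6) b (by norm_num)]
  rw [if_pos h]
  by_cases h2 : a + 6 < b
  · rw [if_pos h2]
    have hc : ((b - a + 6 - 1) / 6).toNat = ((b - (a+6) + 6 - 1) / 6).toNat + 1 := by omega
    rw [hc, List.range_succ_eq_map]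
    simp only [List.map_cons, List.map_map]
    congr 1
    · norm_num
    · apply List.map_congr_left
      intro k _
      simp [Function.comp]
      ring
  · rw [if_neg h2]
    have hc : ((b - a + 6 - 1) / 6).toNat = 1 := by omega
    rw [hc]
    simp

theorem pyRange6_nil (a b : Int) (h : b ≤ a) : PySem.List.pyRange a b 6 = [] := by
  rw [PySem.List.pyRange_of_pos a b (by norm_num), if_neg (by omega)]
  simp

theorem pyRange6_shift (b : Int) :
    PySem.List.pyRange 6 b 6 = (PySem.List.pyRange 0 (b - 6) 6).map (· + 6) := by
  rw [PySem.List.pyRange_of_pos 6 b (by norm_num), PySem.List.pyRange_of_pos 0 (b-6) (by norm_num)]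
  have hiff : (6 : Int) < b ↔ (0 : Int) < b - 6 := by omega
  have hcnt : (b - 6 + 6 - 1) / 6 = (b - 6 - 0 + 6 - 1) / 6 := by ring_nf
  rw [List.map_map]
  by_cases h : (6 : Int) < b
  · rw [if_pos h, if_pos (hiff.mp h), hcnt]
    apply List.map_congr_left
    intro k _
    simp [Function.comp]
    ring
  · rw [if_neg h, if_neg (fun hc => h (hiff.mpr hc))]
    simp

-- '\n'.join over the stride-6 chunk blocks equals pvG
theorem pvChunks_eq_G (cs : List Char) :
    PySem.Chars.join ['\n']
      ((PySem.List.pyRange 0 (cs.length : Int) 6).map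
        (fun i => pvBlocks (PySem.List.slice cs (some i) (some (i + 6)))))
    = pvG cs := by
  induction hn : cs.length using Nat.strong_induction_on generalizing cs with
  | _ n ih =>
  subst hn
  by_cases h0 : cs.length = 0
  · rw [h0]
    push_cast
    rw [pyRange6_nil 0 0 le_rfl]
    rw [List.length_eq_zero_iff.mp h0]
    simp [PySem.Chars.join_nil, pvG, pvBlocks]
  · have hpos : (0 : Int) < cs.length := by exact_mod_cast Nat.pos_of_ne_zero h0
    rw [pyRange6_cons 0 _ hpos, List.map_cons]
    have hslice0 : PySem.List.slice cs (some (0:Int)) (some ((0:Int) + 6)) = cs.take 6 := by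
      rw [PySem.List.slice_toNat _ (by norm_num) (by norm_num)]
      norm_num
      simp
    rw [hslice0]
    by_cases h6 : cs.length ≤ 6
    · rw [show (0:Int) + 6 = 6 from by ring, pyRange6_nil 6 _ (by exact_mod_cast h6)]
      rw [List.map_nil, PySem.Chars.join_singleton, pvG, dif_pos h6, List.take_of_length_le h6]
    · have hshift : PySem.List.pyRange (0 + 6) (cs.length : Int) 6
          = (PySem.List.pyRange 0 (((cs.drop 6).length : Int)) 6).map (· + 6) := by
        rw [show (0:Int) + 6 = 6 from by ring, pyRange6_shift]
        congr 2
        simp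
        omega
      rw [hshift, List.map_map]
      have hmap : (PySem.List.pyRange 0 (((cs.drop 6).length : Int)) 6).map
            ((fun i => pvBlocks (PySem.List.slice cs (some i) (some (i + 6)))) ∘ (· + 6))
          = (PySem.List.pyRange 0 (((cs.drop 6).length : Int)) 6).map
            (fun i => pvBlocks (PySem.List.slice (cs.drop 6) (some i) (some (i + 6)))) := by
        apply List.map_congr_left
        intro i hi
        have hipos : 0 ≤ i := by
          obtain ⟨h1, -, -⟩ := (PySem.List.mem_pyRange_iff_of_pos (by norm_num : (0:Int) < 6) i).mp hi
          exact h1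
        simp only [Function.comp]
        congr 1
        rw [PySem.List.slice_toNat _ (by omega) (by omega),
            PySem.List.slice_toNat _ (by omega) (by omega), List.drop_drop]
        have e1 : (i + 6 + 6).toNat - (i + 6).toNat = (i + 6).toNat - i.toNat := by omega
        have e2 : (i + 6).toNat = i.toNat + 6 := by omega
        rw [e1, e2, Nat.add_comm i.toNat 6]
      rw [hmap]
      have hd6 : (cs.drop 6).length ≠ 0 := by simp; omega
      have hdpos : (0 : Int) < (cs.drop 6).length := by exact_mod_cast Nat.pos_of_ne_zero hd6
      have hih := ih (cs.drop 6).length (by simp; omega) _ rfl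
      rw [pyRange6_cons 0 _ hdpos, List.map_cons] at hih
      rw [pyRange6_cons 0 _ hdpos, List.map_cons, PySem.Chars.join_cons_cons, hih]
      conv_rhs => rw [pvG]
      rw [dif_neg h6]
      simp

-- ''.join with empty separator is flatten
theorem pvJoin_nil_sep (ps : List (List Char)) : PySem.Chars.join [] ps = ps.flatten := by
  induction ps with
  | nil => simp [PySem.Chars.join_nil]
  | cons p ps ih =>
    rcases ps with _ | ⟨q, qs⟩
    · simp [PySem.Chars.join_singleton]
    · rw [PySem.Chars.join_cons_cons, ih]
      simp

theorem pvGetD_blk (c : Char) : (PySem.Dict.getD pvBlockDict c "").toList = pvBlk c := by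
  by_cases h1 : c = '1'
  · subst h1; decide
  · by_cases h0 : c = '0'
    · subst h0; decide
    · rw [pvBlk, if_neg h1, if_neg h0]
      simp only [pvBlockDict, PySem.Dict.getD]
      have hget : PySem.Dict.get? (PySem.Dict.insert (PySem.Dict.insert PySem.Dict.empty '1' "---\n") '0' "- -\n") c = none := by
        rw [PySem.Dict.get?_insert_of_ne _ _ (by simpa using h0),
            PySem.Dict.get?_insert_of_ne _ _ (by simpa using h1)]
        rfl
      rw [hget]
      rfl

theorem pvGroup_toList (s : String) (i : Int) :
    (PySem.Str.join ""
      ((PySem.Str.slice s (some i) (some (i + 6))).toList.map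
        (fun c => PySem.Dict.getD pvBlockDict c ""))).toList
    = pvBlocks (PySem.List.slice s.toList (some i) (some (i + 6))) := by
  rw [PySem.Str.toList_join, show ("" : String).toList = ([] : List Char) from rfl, pvJoin_nil_sep]
  simp only [PySem.Str.toList_slice, List.map_map, pvBlocks]
  show (List.map (String.toList ∘ fun c => PySem.Dict.getD pvBlockDict c "")
      (PySem.List.slice s.toList (some i) (some (i + 6)))).flatten = _
  congr 1
  apply List.map_congr_left
  intro c _
  exact pvGetD_blk c

theorem pvAlt_eq (s : String) :
    binary_to_symbol_alt s = String.ofList (pvG s.toList) := by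
  have h1 : (binary_to_symbol_alt s).toList = pvG s.toList := by
    simp only [binary_to_symbol_alt]
    rw [PySem.Str.toList_join]
    rw [← pvChunks_eq_G s.toList]
    congr 1
    rw [List.map_map, PySem.Str.len_eq]
    apply List.map_congr_left
    intro i _
    exact pvGroup_toList s i
  calc binary_to_symbol_alt s
      = String.ofList (binary_to_symbol_alt s).toList := by simp [String.ofList]
    _ = String.ofList (pvG s.toList) := by rw [h1]

-- ===== VERDICT (by name: the statement is the Claim_ definition above) =====
theorem binary_to_symbol_spec : Claim_equal_binary_to_symbol := by
  intro s _
  unfold Spec_binary_to_symbol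
  rw [pvAlt_eq]
  simp only [binary_to_symbol]
  have hstep : (fun (st : List Char × Int) c =>
      let rep := if c = '1' then st.1 ++ "---\n".toList
                 else if c = '0' then st.1 ++ "- -\n".toList
                 else st.1
      let tc := st.2 + 1
      let rep := if PySem.Int.mod tc 6 = 0 ∧ tc < PySem.Str.len s
                 then rep ++ ['\n'] else rep
      (rep, tc)) = pvStepA (PySem.Str.len s) := by
    funext st c
    rfl
  rw [hstep, pvFoldA _ _ [] 0]
  simp only [List.nil_append]
  congr 1
  have hG := pvH_eq_G s.toList 0 le_rfl (by norm_num)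
  rw [PySem.Str.len_eq]
  simpa using hG
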